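-- pv_equiv track=rewrite | github.com/yxtay/code-ex | src/abbreviation.py | abbreviation_dp
-- ===== SOURCE A (Python) =====
-- def abbreviation_dp(a, b):
--     m, n = len(a), len(b)
--     dp = [[False] * (m + 1) for _ in range(n + 1)]
--
--     # when both are empty strings, it is definitely true
--     dp[0][0] = True
--     # when b is empty string, row = 0
--     # check if a is lower case, which can be dropped
--     # previous sub problem is col - 1
--     for col in range(1, m + 1):
--         dp[0][col] = a[col - 1].islower() and dp[0][col - 1]
--     # when a is empty string, col = 0
--     # always false, no need to check
--     # since matrix initialised with false, no further action
--
--     for row in range(1, n + 1):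
--         for col in range(1, m + 1):
--             if dp[row - 1][col - 1] and a[col - 1].upper() == b[row - 1]:
--                 # a_ch and b_ch match, remove both
--                 # sub problem: row - 1, col - 1
--                 dp[row][col] = True
--                 continue
--
--             if dp[row][col - 1] and a[col - 1].islower():
--                 # a_ch is lower case, can be dropped
--                 # sub problem: row, col - 1
--                 dp[row][col] = True
--             # else cell remain false, no action required
--     return dp[n][m]
-- ===== SOURCE B (Python) =====
-- def abbreviation_dp(a, b):
--     # top-down memoized recursion over prefix lengths (i of a, j of b)
--     memo = {}
--
--     def solve(i, j):
--         # can a[:i] be abbreviated to b[:j]?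
--         if i == 0:
--             return j == 0
--         key = (i, j)
--         if key in memo:
--             return memo[key]
--         res = j > 0 and a[i - 1].upper() == b[j - 1] and solve(i - 1, j - 1)
--         if not res and a[i - 1].islower():
--             res = solve(i - 1, j)
--         memo[key] = res
--         return res
--
--     return solve(len(a), len(b))
-- ===== Notes on version B (the rewrite author's own statement) =====
-- stated objective: faster
-- what changed: Inverts A's bottom-up (n+1)x(m+1) grid (base-row pass plus nested row/col loops) into top-down memoized recursion solve(i, j) over prefix lengths, which computes only the DP states reachable from (len(a), len(b)) instead of filling the whole table.
import Mathlib
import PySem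

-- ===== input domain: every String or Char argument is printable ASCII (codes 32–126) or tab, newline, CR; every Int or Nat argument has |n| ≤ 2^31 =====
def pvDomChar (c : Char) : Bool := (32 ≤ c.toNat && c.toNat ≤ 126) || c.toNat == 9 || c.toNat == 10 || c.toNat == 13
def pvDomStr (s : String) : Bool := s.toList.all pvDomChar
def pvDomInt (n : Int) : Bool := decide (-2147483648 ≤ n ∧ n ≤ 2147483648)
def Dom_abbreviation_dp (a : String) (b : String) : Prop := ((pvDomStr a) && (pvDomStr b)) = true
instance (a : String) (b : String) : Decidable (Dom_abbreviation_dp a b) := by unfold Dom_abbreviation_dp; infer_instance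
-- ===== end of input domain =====

-- B inverts A's bottom-up (n+1)×(m+1) grid into top-down memoized recursion over
-- prefix lengths, visiting only the states reachable from (len a, len b): an
-- alternative decomposition of the same task.

-- ===== PORT A =====
-- dp[row][col] = x  (both indices always in range in A on its loop bounds)
def pvSet2 (g : List (List Bool)) (r c : Nat) (x : Bool) : List (List Bool) :=
  g.set r ((g.getD r []).set c x)

-- literal transliteration of A: grid of (n+1) rows × (m+1) cols, base-row pass over
-- cols, then nested row/col loops (range(1, k+1) = List.range' 1 k); all Python
-- indexing in A is in range, so getD is exact there.
def abbreviation_dp (a : String) (b : String) : Bool :=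
  let al := a.toList
  let bl := b.toList
  let m := al.length
  let n := bl.length
  let dp0 : List (List Bool) := List.replicate (n + 1) (List.replicate (m + 1) false)
  let dp1 := pvSet2 dp0 0 0 true
  let dp2 := (List.range' 1 m).foldl (fun dp col =>
      pvSet2 dp 0 col
        (PySem.Chars.islower (al.getD (col - 1) ' ') && (dp.getD 0 []).getD (col - 1) false)) dp1
  let dp3 := (List.range' 1 n).foldl (fun dp row =>
      (List.range' 1 m).foldl (fun dp col =>
        if (dp.getD (row - 1) []).getD (col - 1) false &&
            (PySem.Chars.upperChar (al.getD (col - 1) ' ') == bl.getD (row - 1) ' ') then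
          pvSet2 dp row col true
        else if (dp.getD row []).getD (col - 1) false &&
            PySem.Chars.islower (al.getD (col - 1) ' ') then
          pvSet2 dp row col true
        else dp) dp) dp2
  (dp3.getD n []).getD m false

-- ===== PORT B =====
-- solve(i, j) with the memo dict threaded through, exactly Source B's statement order:
-- base case before the memo lookup, the short-circuit match branch, then the
-- lowercase-drop branch, then the memo write.
def pvSolve (al bl : List Char) : Nat → Nat → PySem.Dict (Nat × Nat) Bool →
    Bool × PySem.Dict (Nat × Nat) Bool
  | 0, j, memo => ((j == 0 : Bool), memo)
  | i + 1, j, memo =>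
    match memo.get? (i + 1, j) with
    | some v => (v, memo)
    | none =>
      -- res = j > 0 and a[i].upper() == b[j-1] and solve(i, j-1)
      let p1 : Bool × PySem.Dict (Nat × Nat) Bool :=
        if 0 < j then
          if PySem.Chars.upperChar (al.getD i ' ') == bl.getD (j - 1) ' ' then
            pvSolve al bl i (j - 1) memo
          else (false, memo)
        else (false, memo)
      -- if not res and a[i].islower(): res = solve(i, j)
      let p2 : Bool × PySem.Dict (Nat × Nat) Bool :=
        if !p1.1 && PySem.Chars.islower (al.getD i ' ') then pvSolve al bl i j p1.2
        else p1
      (p2.1, p2.2.insert (i + 1, j) p2.1)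

def abbreviation_dp_alt (a : String) (b : String) : Bool :=
  (pvSolve a.toList b.toList a.toList.length b.toList.length PySem.Dict.empty).1

-- ===== PRECONDITION & SPEC =====
def Spec_abbreviation_dp (a : String) (b : String) (out : Bool) : Prop := out = abbreviation_dp_alt a b
instance (a : String) (b : String) (out : Bool) : Decidable (Spec_abbreviation_dp a b out) := by unfold Spec_abbreviation_dp; infer_instance

-- ===== CLAIM (what is proved, stated in full; the proofs are below) =====
def Claim_equal_abbreviation_dp : Prop := ∀ (a : String) (b : String), Dom_abbreviation_dp a b → Spec_abbreviation_dp a b (abbreviation_dp a b)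

-- ===== LEMMAS AND PROOFS =====

-- the common recurrence: pvF bl p j decides whether the a-prefix whose REVERSE is p
-- abbreviates to the first j characters of bl
def pvF (bl : List Char) : List Char → Nat → Bool
  | [], 0 => true
  | [], _ + 1 => false
  | c :: rest, 0 => PySem.Chars.islower c && pvF bl rest 0
  | c :: rest, j + 1 =>
      ((PySem.Chars.upperChar c == bl.getD j ' ') && pvF bl rest j) ||
        (PySem.Chars.islower c && pvF bl rest (j + 1))

theorem pvRevTake (al : List Char) (i : Nat) (hi : i < al.length) :
    (al.take (i + 1)).reverse = al.getD i ' ' :: (al.take i).reverse := by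
  rw [List.take_add_one, List.reverse_append]
  simp [List.getElem?_eq_getElem hi, List.getD_eq_getElem?_getD]

-- ---- B side ----

-- every value already in the memo is the right one
def pvMemoOK (al bl : List Char) (memo : PySem.Dict (Nat × Nat) Bool) : Prop :=
  ∀ i j v, memo.get? (i, j) = some v → v = pvF bl (al.take i).reverse j

theorem pvMemoOK_insert (al bl : List Char) (memo : PySem.Dict (Nat × Nat) Bool)
    (h : pvMemoOK al bl memo) (i j : Nat) (v : Bool)
    (hv : v = pvF bl (al.take i).reverse j) :
    pvMemoOK al bl (memo.insert (i, j) v) := by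
  intro i' j' v' hv'
  rw [PySem.Dict.get?_insert] at hv'
  split_ifs at hv' with heq
  · simp only [Prod.mk.injEq] at heq
    obtain ⟨rfl, rfl⟩ := heq
    cases hv'
    exact hv
  · exact h i' j' v' hv'

theorem pvSolve_correct (al bl : List Char) (i : Nat) (hi : i ≤ al.length) (j : Nat)
    (memo : PySem.Dict (Nat × Nat) Bool) (h : pvMemoOK al bl memo) :
    (pvSolve al bl i j memo).1 = pvF bl (al.take i).reverse j ∧
      pvMemoOK al bl (pvSolve al bl i j memo).2 := by
  induction i generalizing j memo with
  | zero =>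
    refine ⟨?_, h⟩
    cases j <;> simp [pvSolve, pvF]
  | succ i ih =>
    have hi' : i ≤ al.length := by omega
    have hrev := pvRevTake al i (by omega)
    cases hm : memo.get? (i + 1, j) with
    | some v =>
      refine ⟨?_, ?_⟩ <;> simp only [pvSolve, hm]
      · exact h (i + 1) j v hm
      · exact h
    | none =>
      simp only [pvSolve, hm]
      rcases j with _ | jj
      · -- j = 0: the first branch yields (false, memo)
        rw [if_neg (by omega : ¬ (0:Nat) < 0)]
        by_cases hlow : PySem.Chars.islower (al.getD i ' ') = true
        · have hc : (!(false, memo).1 && PySem.Chars.islower (al.getD i ' ')) = true := by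
            simpa using hlow
          rw [if_pos hc]
          obtain ⟨hr1, hr2⟩ := ih hi' 0 memo h
          have hv : (pvSolve al bl i 0 memo).1 = pvF bl (al.take (i + 1)).reverse 0 := by
            rw [hr1, hrev]
            simp only [pvF, hlow, Bool.true_and]
          exact ⟨hv, pvMemoOK_insert al bl _ hr2 (i + 1) 0 _ hv⟩
        · have hlow' : PySem.Chars.islower (al.getD i ' ') = false := by
            cases hx : PySem.Chars.islower (al.getD i ' ') <;> simp_all
          have hc : ¬ ((!(false, memo).1 && PySem.Chars.islower (al.getD i ' ')) = true) := by
            simp only [Bool.not_false, Bool.true_and]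
            simpa using hlow' 
          rw [if_neg hc]
          have hv : ((false, memo) : Bool × PySem.Dict (Nat × Nat) Bool).1 =
              pvF bl (al.take (i + 1)).reverse 0 := by
            rw [hrev]
            simp only [pvF, hlow', Bool.false_and]
          exact ⟨hv, pvMemoOK_insert al bl _ h (i + 1) 0 _ hv⟩
      · -- j = jj + 1
        rw [if_pos (Nat.succ_pos jj)]
        simp only [Nat.add_sub_cancel]
        by_cases hmat : (PySem.Chars.upperChar (al.getD i ' ') == bl.getD jj ' ') = true
        · rw [if_pos hmat]
          obtain ⟨hr1, hr2⟩ := ih hi' jj memo h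
          by_cases hres : (pvSolve al bl i jj memo).1 = true
          · -- match branch succeeded: drop branch skipped
            have hc : ¬ ((!(pvSolve al bl i jj memo).1 &&
                PySem.Chars.islower (al.getD i ' ')) = true) := by
              rw [hres]
              simp
            rw [if_neg hc]
            have hv : (pvSolve al bl i jj memo).1 =
                pvF bl (al.take (i + 1)).reverse (jj + 1) := by
              rw [hres, hrev]
              simp only [pvF, hmat, Bool.true_and]
              rw [← hr1, hres]
              simp
            exact ⟨hv, pvMemoOK_insert al bl _ hr2 (i + 1) (jj + 1) _ hv⟩
          · have hres' : (pvSolve al bl i jj memo).1 = false := by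
              cases hx : (pvSolve al bl i jj memo).1 <;> simp_all
            by_cases hlow : PySem.Chars.islower (al.getD i ' ') = true
            · have hc : (!(pvSolve al bl i jj memo).1 &&
                  PySem.Chars.islower (al.getD i ' ')) = true := by
                rw [hres']
                simpa using hlow
              rw [if_pos hc]
              obtain ⟨hq1, hq2⟩ := ih hi' (jj + 1) (pvSolve al bl i jj memo).2 hr2
              have hv : (pvSolve al bl i (jj + 1) (pvSolve al bl i jj memo).2).1 =
                  pvF bl (al.take (i + 1)).reverse (jj + 1) := by
                rw [hq1, hrev]
                simp only [pvF, hmat, Bool.true_and, hlow]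
                rw [← hr1, hres']
                simp
              exact ⟨hv, pvMemoOK_insert al bl _ hq2 (i + 1) (jj + 1) _ hv⟩
            · have hlow' : PySem.Chars.islower (al.getD i ' ') = false := by
                cases hx : PySem.Chars.islower (al.getD i ' ') <;> simp_all
              have hc : ¬ ((!(pvSolve al bl i jj memo).1 &&
                  PySem.Chars.islower (al.getD i ' ')) = true) := by
                rw [hres']
                simp only [Bool.not_false, Bool.true_and]
                simpa using hlow' 
              rw [if_neg hc]
              have hv : (pvSolve al bl i jj memo).1 =
                  pvF bl (al.take (i + 1)).reverse (jj + 1) := by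
                rw [hrev]
                simp only [pvF, hmat, Bool.true_and, hlow', Bool.false_and, Bool.or_false]
                rw [← hr1, hres']
              exact ⟨hv, pvMemoOK_insert al bl _ hr2 (i + 1) (jj + 1) _ hv⟩
        · -- no match: the match branch yields (false, memo)
          have hmat' : (PySem.Chars.upperChar (al.getD i ' ') == bl.getD jj ' ') = false := by
            cases hx : (PySem.Chars.upperChar (al.getD i ' ') == bl.getD jj ' ') <;> simp_all
          rw [if_neg hmat]
          by_cases hlow : PySem.Chars.islower (al.getD i ' ') = true
          · have hc : (!(false, memo).1 && PySem.Chars.islower (al.getD i ' ')) = true := by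
              simpa using hlow
            rw [if_pos hc]
            obtain ⟨hq1, hq2⟩ := ih hi' (jj + 1) memo h
            have hv : (pvSolve al bl i (jj + 1) memo).1 =
                pvF bl (al.take (i + 1)).reverse (jj + 1) := by
              rw [hq1, hrev]
              simp only [pvF, hmat', Bool.false_and, Bool.false_or, hlow, Bool.true_and]
            exact ⟨hv, pvMemoOK_insert al bl _ hq2 (i + 1) (jj + 1) _ hv⟩
          · have hlow' : PySem.Chars.islower (al.getD i ' ') = false := by
              cases hx : PySem.Chars.islower (al.getD i ' ') <;> simp_all
            have hc : ¬ ((!(false, memo).1 && PySem.Chars.islower (al.getD i ' ')) = true) := by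
              simp only [Bool.not_false, Bool.true_and]
              simpa using hlow' 
            rw [if_neg hc]
            have hv : ((false, memo) : Bool × PySem.Dict (Nat × Nat) Bool).1 =
                pvF bl (al.take (i + 1)).reverse (jj + 1) := by
              rw [hrev]
              simp only [pvF, hmat', Bool.false_and, Bool.false_or, hlow']
            exact ⟨hv, pvMemoOK_insert al bl _ h (i + 1) (jj + 1) _ hv⟩

theorem alt_eq_pvF (a b : String) :
    abbreviation_dp_alt a b = pvF b.toList a.toList.reverse b.toList.length := by
  unfold abbreviation_dp_alt
  have h0 : pvMemoOK a.toList b.toList PySem.Dict.empty := by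
    intro i j v hv
    rw [PySem.Dict.get?_empty] at hv
    cases hv
  have := (pvSolve_correct a.toList b.toList a.toList.length (le_refl _) b.toList.length
    PySem.Dict.empty h0).1
  rw [List.take_length] at this
  exact this

-- ---- A side ----

theorem pvGetDSetSelf {α : Type} (l : List α) (n : Nat) (x d : α) (h : n < l.length) :
    (l.set n x).getD n d = x := by
  rw [List.getD_eq_getElem?_getD, List.getElem?_set_self h]; rfl

theorem pvGetDSetNe {α : Type} (l : List α) (n m : Nat) (x d : α) (h : m ≠ n) :
    (l.set n x).getD m d = l.getD m d := by
  rw [List.getD_eq_getElem?_getD, List.getElem?_set_ne (by omega), ← List.getD_eq_getElem?_getD]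

theorem pvGetDSetOob {α : Type} (l : List α) (n m : Nat) (x d : α) (h : l.length ≤ n) :
    (l.set n x).getD m d = l.getD m d := by
  rw [List.set_eq_of_length_le h]

theorem pvGetDReplicate {α : Type} (n i : Nat) (x d : α) :
    (List.replicate n x).getD i d = if i < n then x else d := by
  rw [List.getD_eq_getElem?_getD, List.getElem?_replicate]; split <;> rfl

-- grid access
def pvGG (g : List (List Bool)) (j i : Nat) : Bool := (g.getD j []).getD i false

theorem pvGG_set2_same (g : List (List Bool)) (r c : Nat) (x : Bool)
    (hr : r < g.length) (hc : c < (g.getD r []).length) :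
    pvGG (pvSet2 g r c x) r c = x := by
  unfold pvGG pvSet2
  rw [pvGetDSetSelf _ _ _ _ hr, pvGetDSetSelf _ _ _ _ hc]

theorem pvSet2_row_other (g : List (List Bool)) (r c : Nat) (x : Bool) (j : Nat) (hj : j ≠ r) :
    (pvSet2 g r c x).getD j [] = g.getD j [] := by
  unfold pvSet2; rw [pvGetDSetNe _ _ _ _ _ hj]

theorem pvGG_set2_other_col (g : List (List Bool)) (r c : Nat) (x : Bool) (i : Nat) (hi : i ≠ c) :
    pvGG (pvSet2 g r c x) r i = pvGG g r i := by
  unfold pvGG pvSet2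
  by_cases hr : r < g.length
  · rw [pvGetDSetSelf _ _ _ _ hr, pvGetDSetNe _ _ _ _ _ hi]
  · rw [pvGetDSetOob g r r _ _ (by omega)]

theorem pvSet2_length (g : List (List Bool)) (r c : Nat) (x : Bool) :
    (pvSet2 g r c x).length = g.length := by simp [pvSet2]

theorem pvSet2_rowlen (g : List (List Bool)) (r c : Nat) (x : Bool) (j : Nat) :
    ((pvSet2 g r c x).getD j []).length = (g.getD j []).length := by
  by_cases hj : j = r
  · subst hj
    by_cases hr : j < g.length
    · unfold pvSet2; rw [pvGetDSetSelf _ _ _ _ hr]; simp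
    · unfold pvSet2; rw [pvGetDSetOob g j j _ _ (by omega)]
  · rw [pvSet2_row_other _ _ _ _ _ hj]

-- invariant for the base-row loop (row 0): after processing cols 1..c
def pvInv0 (al bl : List Char) (c : Nat) (g : List (List Bool)) : Prop :=
  g.length = bl.length + 1 ∧
  (∀ j, ((g.getD j []).length = if j ≤ bl.length then al.length + 1 else 0)) ∧
  (∀ i, i ≤ c → pvGG g 0 i = pvF bl (al.take i).reverse 0) ∧
  (∀ i, c < i → pvGG g 0 i = false) ∧
  (∀ j, 1 ≤ j → j ≤ bl.length → g.getD j [] = List.replicate (al.length + 1) false)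

-- invariant inside the main loops: rows 1..r done up to col c, rest of row r false,
-- rows r+1.. untouched; rows ≤ some bound fully done
def pvInvMain (al bl : List Char) (r c : Nat) (g : List (List Bool)) : Prop :=
  g.length = bl.length + 1 ∧
  (∀ j, ((g.getD j []).length = if j ≤ bl.length then al.length + 1 else 0)) ∧
  (∀ j, j < r → ∀ i, i ≤ al.length → pvGG g j i = pvF bl (al.take i).reverse j) ∧
  (∀ i, i ≤ c → pvGG g r i = pvF bl (al.take i).reverse r) ∧
  (∀ i, c < i → pvGG g r i = false) ∧
  (∀ j, r < j → j ≤ bl.length → g.getD j [] = List.replicate (al.length + 1) false)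

theorem pvInv0_step (al bl : List Char) (c : Nat) (g : List (List Bool))
    (hc : c < al.length) (h : pvInv0 al bl c g) :
    pvInv0 al bl (c + 1)
      (pvSet2 g 0 (c + 1)
        (PySem.Chars.islower (al.getD c ' ') && (g.getD 0 []).getD c false)) := by
  obtain ⟨hlen, hrow, hcur, hfalse, hrest⟩ := h
  have hg0 : 0 < g.length := by omega
  have hrl : (g.getD 0 []).length = al.length + 1 := by rw [hrow]; simp
  refine ⟨by rw [pvSet2_length]; exact hlen,
    fun j => by rw [pvSet2_rowlen]; exact hrow j, ?_, ?_, ?_⟩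
  · intro i hi
    rcases Nat.lt_or_ge i (c + 1) with hlt | hge
    · rw [pvGG_set2_other_col _ _ _ _ _ (by omega)]
      exact hcur i (by omega)
    · have hi' : i = c + 1 := by omega
      subst hi'
      rw [pvGG_set2_same _ _ _ _ hg0 (by omega), pvRevTake al c hc]
      simp only [pvF]
      have := hcur c (le_refl c)
      simp only [pvGG] at this
      rw [this]
  · intro i hi
    rw [pvGG_set2_other_col _ _ _ _ _ (by omega)]
    exact hfalse i (by omega)
  · intro j hj1 hj2
    rw [pvSet2_row_other _ _ _ _ _ (by omega)]
    exact hrest j hj1 hj2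

theorem pvInv0_fold_gen (al bl : List Char) (k c : Nat) (g : List (List Bool))
    (hk : c + k ≤ al.length) (h : pvInv0 al bl c g) :
    pvInv0 al bl (c + k)
      ((List.range' (c + 1) k).foldl (fun dp col =>
        pvSet2 dp 0 col
          (PySem.Chars.islower (al.getD (col - 1) ' ') &&
            (dp.getD 0 []).getD (col - 1) false)) g) := by
  induction k generalizing c g with
  | zero => simpa using h
  | succ k ih =>
    rw [List.range'_succ, List.foldl_cons]
    have hstep := pvInv0_step al bl c g (by omega) h
    have := ih (c + 1) _ (by omega) hstep
    simpa [Nat.add_assoc, Nat.add_comm 1 k] using this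

theorem pvInv0_fold (al bl : List Char) (g : List (List Bool)) (h : pvInv0 al bl 0 g) :
    pvInv0 al bl al.length
      ((List.range' 1 al.length).foldl (fun dp col =>
        pvSet2 dp 0 col
          (PySem.Chars.islower (al.getD (col - 1) ' ') &&
            (dp.getD 0 []).getD (col - 1) false)) g) := by
  simpa using pvInv0_fold_gen al bl al.length 0 g (by omega) h

theorem pvMainStep (al bl : List Char) (r c : Nat) (g : List (List Bool))
    (hr1 : 1 ≤ r) (hr : r ≤ bl.length) (hc : c < al.length) (h : pvInvMain al bl r c g) :
    pvInvMain al bl r (c + 1)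
      (if (g.getD (r - 1) []).getD c false &&
          (PySem.Chars.upperChar (al.getD c ' ') == bl.getD (r - 1) ' ') then
        pvSet2 g r (c + 1) true
      else if (g.getD r []).getD c false && PySem.Chars.islower (al.getD c ' ') then
        pvSet2 g r (c + 1) true
      else g) := by
  obtain ⟨hlen, hrow, hdone, hcur, hfalse, hrest⟩ := h
  have hg0 : r < g.length := by omega
  have hrl : (g.getD r []).length = al.length + 1 := by rw [hrow]; simp [hr]
  obtain ⟨r', rfl⟩ : ∃ r', r = r' + 1 := ⟨r - 1, by omega⟩
  have hX : (g.getD (r' + 1 - 1) []).getD c false = pvF bl (al.take c).reverse r' :=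
    hdone r' (by omega) c (by omega)
  have hY : (g.getD (r' + 1) []).getD c false = pvF bl (al.take c).reverse (r' + 1) :=
    hcur c (le_refl c)
  -- the new value of cell (r, c+1) demanded by the recurrence
  have hval : pvF bl (al.take (c + 1)).reverse (r' + 1) =
      (((PySem.Chars.upperChar (al.getD c ' ') == bl.getD r' ' ') &&
          pvF bl (al.take c).reverse r') ||
        (PySem.Chars.islower (al.getD c ' ') && pvF bl (al.take c).reverse (r' + 1))) := by
    rw [pvRevTake al c hc]; simp [pvF]
  split_ifs with h1 h2
  · refine ⟨by rw [pvSet2_length]; exact hlen,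
      fun j => by rw [pvSet2_rowlen]; exact hrow j, ?_, ?_, ?_, ?_⟩
    · intro j hj i hi
      simp only [pvGG, pvSet2_row_other _ _ _ _ _ (by omega : j ≠ r' + 1)]
      exact hdone j hj i hi
    · intro i hi
      rcases Nat.lt_or_ge i (c + 1) with hlt | hge
      · rw [pvGG_set2_other_col _ _ _ _ _ (by omega)]; exact hcur i (by omega)
      · have hi' : i = c + 1 := by omega
        subst hi'
        rw [pvGG_set2_same _ _ _ _ hg0 (by omega), hval]
        rw [hX] at h1
        rcases Bool.and_eq_true _ _ |>.mp h1 with ⟨ha, hb⟩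
        simp only [beq_iff_eq, Nat.add_sub_cancel, List.getD_eq_getElem?_getD] at hb
        simp [ha, hb]
    · intro i hi
      rw [pvGG_set2_other_col _ _ _ _ _ (by omega)]; exact hfalse i (by omega)
    · intro j hj1 hj2
      rw [pvSet2_row_other _ _ _ _ _ (by omega)]; exact hrest j (by omega) hj2
  · refine ⟨by rw [pvSet2_length]; exact hlen,
      fun j => by rw [pvSet2_rowlen]; exact hrow j, ?_, ?_, ?_, ?_⟩
    · intro j hj i hi
      simp only [pvGG, pvSet2_row_other _ _ _ _ _ (by omega : j ≠ r' + 1)]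
      exact hdone j hj i hi
    · intro i hi
      rcases Nat.lt_or_ge i (c + 1) with hlt | hge
      · rw [pvGG_set2_other_col _ _ _ _ _ (by omega)]; exact hcur i (by omega)
      · have hi' : i = c + 1 := by omega
        subst hi'
        rw [pvGG_set2_same _ _ _ _ hg0 (by omega), hval]
        rw [hY] at h2
        rcases Bool.and_eq_true _ _ |>.mp h2 with ⟨ha, hb⟩
        simp only [List.getD_eq_getElem?_getD] at hb
        simp [ha, hb]
    · intro i hi
      rw [pvGG_set2_other_col _ _ _ _ _ (by omega)]; exact hfalse i (by omega)
    · intro j hj1 hj2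
      rw [pvSet2_row_other _ _ _ _ _ (by omega)]; exact hrest j (by omega) hj2
  · refine ⟨hlen, hrow, hdone, ?_, fun i hi => hfalse i (by omega), hrest⟩
    intro i hi
    rcases Nat.lt_or_ge i (c + 1) with hlt | hge
    · exact hcur i (by omega)
    · have hi' : i = c + 1 := by omega
      subst hi'
      have hcell : pvGG g (r' + 1) (c + 1) = false := hfalse (c + 1) (by omega)
      rw [hcell, hval]
      rw [hX] at h1; rw [hY] at h2
      have e1 := Bool.of_not_eq_true h1
      have e2 := Bool.of_not_eq_true h2
      cases hA : pvF bl (al.take c).reverse r' <;>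
        cases hB : pvF bl (al.take c).reverse (r' + 1) <;> simp_all

theorem pvInner_fold (al bl : List Char) (r : Nat) (hr1 : 1 ≤ r) (hr : r ≤ bl.length)
    (k c : Nat) (g : List (List Bool)) (hk : c + k ≤ al.length) (h : pvInvMain al bl r c g) :
    pvInvMain al bl r (c + k)
      ((List.range' (c + 1) k).foldl (fun dp col =>
        if (dp.getD (r - 1) []).getD (col - 1) false &&
            (PySem.Chars.upperChar (al.getD (col - 1) ' ') == bl.getD (r - 1) ' ') then
          pvSet2 dp r col true
        else if (dp.getD r []).getD (col - 1) false &&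
            PySem.Chars.islower (al.getD (col - 1) ' ') then
          pvSet2 dp r col true
        else dp) g) := by
  induction k generalizing c g with
  | zero => simpa using h
  | succ k ih =>
    rw [List.range'_succ, List.foldl_cons]
    have hstep := pvMainStep al bl r c g hr1 hr (by omega) h
    have := ih (c + 1) _ (by omega) hstep
    simpa [Nat.add_assoc, Nat.add_comm 1 k] using this

theorem pvRowShift (al bl : List Char) (r : Nat) (hr : r < bl.length)
    (g : List (List Bool)) (h : pvInvMain al bl r al.length g) :
    pvInvMain al bl (r + 1) 0 g := by
  obtain ⟨hlen, hrow, hdone, hcur, hfalse, hrest⟩ := h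
  have hnext : g.getD (r + 1) [] = List.replicate (al.length + 1) false :=
    hrest (r + 1) (by omega) (by omega)
  refine ⟨hlen, hrow, ?_, ?_, ?_, fun j hj1 hj2 => hrest j (by omega) hj2⟩
  · intro j hj i hi
    rcases Nat.lt_or_ge j r with hlt | hge
    · exact hdone j hlt i hi
    · have : j = r := by omega
      subst this
      exact hcur i hi
  · intro i hi
    have : i = 0 := by omega
    subst this
    simp only [pvGG]
    rw [hnext, pvGetDReplicate]
    simp [pvF]
  · intro i hi
    simp only [pvGG]
    rw [hnext, pvGetDReplicate]
    split <;> rfl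

theorem pvOuter_fold (al bl : List Char) (k r : Nat) (g : List (List Bool))
    (hk : r + k ≤ bl.length) (h : pvInvMain al bl r al.length g) :
    pvInvMain al bl (r + k) al.length
      ((List.range' (r + 1) k).foldl (fun dp row =>
        (List.range' 1 al.length).foldl (fun dp col =>
          if (dp.getD (row - 1) []).getD (col - 1) false &&
              (PySem.Chars.upperChar (al.getD (col - 1) ' ') == bl.getD (row - 1) ' ') then
            pvSet2 dp row col true
          else if (dp.getD row []).getD (col - 1) false &&
              PySem.Chars.islower (al.getD (col - 1) ' ') then
            pvSet2 dp row col true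
          else dp) dp) g) := by
  induction k generalizing r g with
  | zero => simpa using h
  | succ k ih =>
    rw [List.range'_succ, List.foldl_cons]
    have hshift := pvRowShift al bl r (by omega) g h
    have hinner := pvInner_fold al bl (r + 1) (by omega) (by omega) al.length 0 g (by omega) hshift
    simp only [Nat.zero_add] at hinner
    have := ih (r + 1) _ (by omega) hinner
    simpa [Nat.add_assoc, Nat.add_comm 1 k] using this

theorem pvInvMain_fold (al bl : List Char) (g : List (List Bool))
    (h : pvInvMain al bl 0 al.length g) :
    pvInvMain al bl bl.length al.length
      ((List.range' 1 bl.length).foldl (fun dp row =>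
        (List.range' 1 al.length).foldl (fun dp col =>
          if (dp.getD (row - 1) []).getD (col - 1) false &&
              (PySem.Chars.upperChar (al.getD (col - 1) ' ') == bl.getD (row - 1) ' ') then
            pvSet2 dp row col true
          else if (dp.getD row []).getD (col - 1) false &&
              PySem.Chars.islower (al.getD (col - 1) ' ') then
            pvSet2 dp row col true
          else dp) dp) g) := by
  simpa using pvOuter_fold al bl bl.length 0 g (by omega) h

theorem pvInv0_to_Main (al bl : List Char) (g : List (List Bool))
    (h : pvInv0 al bl al.length g) : pvInvMain al bl 0 al.length g := by
  obtain ⟨hlen, hrow, hcur, hfalse, hrest⟩ := h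
  refine ⟨hlen, hrow, fun j hj => absurd hj (by omega), hcur, ?_, fun j hj1 hj2 => hrest j (by omega) hj2⟩
  intro i hi
  have hl : (g.getD 0 []).length = al.length + 1 := by rw [hrow]; simp
  simp only [pvGG]
  rw [List.getD_eq_getElem?_getD, List.getElem?_eq_none (by omega)]
  rfl

theorem pvInv0_base (al bl : List Char) :
    pvInv0 al bl 0
      (pvSet2 (List.replicate (bl.length + 1) (List.replicate (al.length + 1) false)) 0 0 true) := by
  have hout : ∀ j, (List.replicate (bl.length + 1) (List.replicate (al.length + 1) false)).getD j []
      = if j < bl.length + 1 then List.replicate (al.length + 1) false else [] :=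
    fun j => pvGetDReplicate _ _ _ _
  refine ⟨?_, ?_, ?_, ?_, ?_⟩
  · rw [pvSet2_length]; simp
  · intro j
    rw [pvSet2_rowlen, hout]
    split
    · simp; omega
    · simp; omega
  · intro i hi
    have : i = 0 := by omega
    subst this
    rw [pvGG_set2_same _ _ _ _ (by simp) (by rw [hout]; simp)]
    rfl
  · intro i hi
    rw [pvGG_set2_other_col _ _ _ _ _ (by omega)]
    simp only [pvGG]
    rw [hout]
    split
    · rw [pvGetDReplicate]; split <;> rfl
    · rfl
  · intro j hj1 hj2
    rw [pvSet2_row_other _ _ _ _ _ (by omega), hout, if_pos (by omega)]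

theorem a_eq_pvF (a b : String) :
    abbreviation_dp a b = pvF b.toList a.toList.reverse b.toList.length := by
  simp only [abbreviation_dp]
  have h1 := pvInv0_base a.toList b.toList
  have h2 := pvInv0_fold a.toList b.toList _ h1
  have h3 := pvInvMain_fold a.toList b.toList _ (pvInv0_to_Main _ _ _ h2)
  have h4 := h3.2.2.2.1 a.toList.length (le_refl _)
  simp only [pvGG, List.take_length] at h4
  exact h4

-- ===== VERDICT (by name: the statement is the Claim_ definition above) =====
theorem abbreviation_dp_spec : Claim_equal_abbreviation_dp := by
  intro a b _
  unfold Spec_abbreviation_dp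
  rw [a_eq_pvF, alt_eq_pvF]
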